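-- pv_equiv track=rewrite | github.com/n1k-n1k/algorithms-TnP-1--toolbox--stepik-217-CSC | 02_greedy_algs/02_4_Huffman_encode.py | huffman_dict
-- ===== SOURCE A (Python) =====
-- def huffman_dict(st):
--     ch_sort = freq_list(st)
--     ch_len = len(ch_sort)
--     ch_dict = dict()
--
--     ch_dict[ch_sort[0]] = '0'
--     if ch_len > 1:
--         for i in range(1, ch_len - 1):
--             ch_dict[ch_sort[i]] = '1' * i + '0'
--         ch_dict[ch_sort[ch_len - 1]] = '1' * (ch_len - 2) + '1'
--
--     return ch_dict
--
-- def freq_list(st):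
--     st_freq = {c: st.count(c) for c in st}
--     return tuple(dict(sorted(st_freq.items(),
--                              key=lambda x: x[1], reverse=True)).keys())
-- ===== SOURCE B (Python) =====
-- def _codes(k):
--     # the whole code book for k symbols, built by recursion on k:
--     # a caterpillar prefix tree -- the first symbol is '0', the rest are the
--     # code book for k-1 symbols prefixed with '1' (a lone trailing symbol is all ones)
--     if k <= 1:
--         return ['0'] * k
--     if k == 2:
--         return ['0', '1']
--     return ['0'] + ['1' + w for w in _codes(k - 1)]
--
-- def huffman_dict(st):
--     cnt = {}
--     for c in st:
--         cnt[c] = cnt.get(c, 0) + 1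
--     order = sorted(cnt, key=lambda c: -cnt[c])
--     return dict(zip(order, _codes(len(order))))
-- ===== Notes on version B (the rewrite author's own statement) =====
-- stated objective: faster
-- what changed: B counts frequencies in one pass, sorts by the negated count ascending, and builds the entire code book by recursion on the number of distinct symbols (a caterpillar prefix tree grown by prefixing '1'), then zips it onto the sorted symbols -- replacing A's per-index closed-form code with first/last special cases inserted into a dict.
import Mathlib
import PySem

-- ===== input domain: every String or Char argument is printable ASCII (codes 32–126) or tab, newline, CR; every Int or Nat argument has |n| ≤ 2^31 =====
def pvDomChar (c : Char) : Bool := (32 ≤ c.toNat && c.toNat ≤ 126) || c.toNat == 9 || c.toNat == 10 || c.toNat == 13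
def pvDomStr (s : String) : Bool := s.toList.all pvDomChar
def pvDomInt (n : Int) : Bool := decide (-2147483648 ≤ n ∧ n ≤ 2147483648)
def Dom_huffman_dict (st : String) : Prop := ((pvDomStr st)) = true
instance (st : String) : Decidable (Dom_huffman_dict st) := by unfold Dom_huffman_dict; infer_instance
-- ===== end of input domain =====

-- B builds the whole code book by recursion on the number of distinct symbols and zips it
-- onto the frequency-sorted symbols, instead of A's per-index code formula with first/last
-- special cases; frequencies are counted in one pass instead of st.count per char (objective: faster).

-- ===== PORT A =====
-- freq_list: {c: st.count(c) for c in st}, then tuple(dict(sorted(items, key=x[1], reverse=True)).keys())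
def freqListA (st : String) : List Char :=
  let stFreq : PySem.Dict Char Int :=
    st.toList.foldl (fun d c => d.insert c ((PySem.Str.count st (String.ofList [c]) : Int))) PySem.Dict.empty
  (PySem.Dict.ofList (PySem.List.sorted stFreq.items (fun x => x.2) true)).keys

-- '1' * i + '0' has no PySem primitive; it is ported exactly as String.ofList (List.replicate i '1' ++ ['0']).
def huffman_dict (st : String) : List (String × String) :=
  let chSort := freqListA st
  let chLen := chSort.length
  match PySem.List.pyGet? chSort 0 with
  | none => []  -- ch_sort[0] raises IndexError (empty string); excluded by Pre_
  | some c0 =>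
    let d0 : PySem.Dict Char String := (PySem.Dict.empty).insert c0 "0"
    let d1 :=
      if chLen > 1 then
        let dm := (PySem.List.pyRange 1 ((chLen : Int) - 1) 1).foldl
          (fun d i => d.insert (PySem.List.pyGetD chSort i ' ')
            (String.ofList (List.replicate i.toNat '1' ++ ['0']))) d0
        dm.insert (PySem.List.pyGetD chSort ((chLen : Int) - 1) ' ')
          (String.ofList (List.replicate (chLen - 2) '1' ++ ['1']))
      else d0
    d1.items.map (fun p => (String.ofList [p.1], p.2))

-- ===== PORT B =====
-- _codes(k): ['0']*k for k<=1; ['0','1'] for k==2; else ['0'] + ['1'+w for w in _codes(k-1)].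
-- Code words are ported on List Char and wrapped with String.ofList at the end.
def codesAlt : Nat → List (List Char)
  | 0 => []
  | 1 => [['0']]
  | 2 => [['0'], ['1']]
  | (k+3) => ['0'] :: (codesAlt (k+2)).map (fun w => '1' :: w)

def huffman_dict_alt (st : String) : List (String × String) :=
  let cnt : PySem.Dict Char Int :=
    st.toList.foldl (fun d c => d.insert c (d.getD c 0 + 1)) PySem.Dict.empty
  let order := PySem.List.sorted cnt.keys (fun c => -(cnt.getD c 0)) false
  let d : PySem.Dict Char (List Char) := PySem.Dict.ofList (order.zip (codesAlt order.length))
  d.items.map (fun p => (String.ofList [p.1], String.ofList p.2))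

-- ===== PRECONDITION & SPEC =====
-- A evaluates ch_sort[0] unconditionally, so the empty string raises IndexError; Pre_ excludes exactly it.
def Pre_huffman_dict (st : String) : Prop := st ≠ ""
instance (st : String) : Decidable (Pre_huffman_dict st) := by unfold Pre_huffman_dict; infer_instance
def pvWitness_huffman_dict : String := "abbccc"

def Spec_huffman_dict (st : String) (out : List (String × String)) : Prop := out = huffman_dict_alt st
instance (st : String) (out : List (String × String)) : Decidable (Spec_huffman_dict st out) := by unfold Spec_huffman_dict; infer_instance

-- ===== CLAIM (what is proved, stated in full; the proofs are below) =====
def Claim_equal_huffman_dict : Prop := ∀ (st : String), Dom_huffman_dict st → Pre_huffman_dict st → Spec_huffman_dict st (huffman_dict st)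
-- ===== LEMMAS AND PROOFS =====

-- single-character substring count equals element count
theorem countGo_single (c : Char) : ∀ (l : List Char) (fuel acc : Nat), l.length ≤ fuel →
    PySem.Chars.count.go [c] fuel l acc = acc + l.count c := by
  intro l
  induction l with
  | nil => intro fuel acc _; cases fuel <;> simp [PySem.Chars.count.go]
  | cons h t ih =>
    intro fuel acc hf
    cases fuel with
    | zero => simp at hf
    | succ f =>
      rw [PySem.Chars.count.go]
      simp only [List.length_cons, Nat.add_le_add_iff_right] at hf
      by_cases hc : c = h
      · subst hc
        simp only [List.isPrefixOf, BEq.rfl, Bool.true_and, if_true, List.length_cons,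
          List.length_nil, List.drop_succ_cons, List.drop_zero]
        rw [ih f (acc + 1) hf, List.count_cons_self]
        omega
      · have : ([c].isPrefixOf (h :: t)) = false := by
          simp [List.isPrefixOf, hc]
        rw [this]
        simp only [if_false, Bool.false_eq_true]
        rw [ih f acc hf, List.count_cons]
        simp [Ne.symm hc]

theorem count_single (st : String) (c : Char) :
    (PySem.Str.count st (String.ofList [c]) : Int) = (st.toList.count c : Int) := by
  have : PySem.Str.count st (String.ofList [c]) = st.toList.count c := by
    simp [PySem.Str.count, PySem.Chars.count]
    rw [countGo_single c st.toList st.length 0 (by simp)]; omega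
  rw [this]

-- lookup in the dict comprehension {c: f(c) for c in xs}
theorem getD_foldl_insert_const {f : Char → Int} (k : Char) :
    ∀ (xs : List Char) (d : PySem.Dict Char Int),
    (xs.foldl (fun d c => d.insert c (f c)) d).getD k 0 =
      if k ∈ xs then f k else d.getD k 0 := by
  intro xs
  induction xs with
  | nil => intro d; simp
  | cons h t ih =>
    intro d
    simp only [List.foldl_cons, ih, List.mem_cons]
    by_cases ht : k ∈ t
    · simp [ht]
    · by_cases hk : k = h
      · simp [hk]
      · simp [ht, hk, PySem.Dict.getD_insert]

-- items of the dict comprehension {c: f(c) for c in xs}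
theorem items_foldl_insert_const (f : Char → Int) (xs : List Char) :
    (xs.foldl (fun d c => d.insert c (f c)) PySem.Dict.empty).items
      = (PySem.Set.ofList xs).map (fun k => (k, f k)) := by
  have hkeys : (xs.foldl (fun d c => d.insert c (f c)) PySem.Dict.empty).keys
      = PySem.Set.ofList xs := by
    have := PySem.Dict.keys_foldl_insert (ν := Int) xs (fun _ c => f c) PySem.Dict.empty
    simpa [PySem.Set.update_nil_left] using this
  have hnd : (xs.foldl (fun d c => d.insert c (f c)) PySem.Dict.empty).keys.Nodup := by
    rw [hkeys]; exact PySem.Set.nodup_ofList xs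
  rw [PySem.Dict.items_eq_map_keys _ hnd 0, hkeys]
  apply List.map_congr_left
  intro k hk
  have hmem : k ∈ xs := (PySem.Set.mem_ofList xs k).mp hk
  rw [getD_foldl_insert_const k xs PySem.Dict.empty, if_pos hmem]

-- insertion sort commutes with map when the comparison factors through the map
theorem insertBy_map {α β : Type} (g : α → β) (b : β → β → Bool) (b' : α → α → Bool)
    (hb : ∀ x y, b (g x) (g y) = b' x y) (x : α) (ys : List α) :
    PySem.List.insertBy b (g x) (ys.map g) = (PySem.List.insertBy b' x ys).map g := by
  induction ys with
  | nil => simp [PySem.List.insertBy]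
  | cons y t ih =>
    simp only [List.map_cons, PySem.List.insertBy, hb]
    by_cases h : b' x y = true
    · simp [h]
    · simp only [Bool.not_eq_true] at h
      simp [h, ih]

theorem foldl_insertBy_map {α β : Type} (g : α → β) (b : β → β → Bool) (b' : α → α → Bool)
    (hb : ∀ x y, b (g x) (g y) = b' x y) :
    ∀ (l : List α) (ys : List α),
    (l.map g).foldl (fun acc y => PySem.List.insertBy b y acc) (ys.map g)
      = (l.foldl (fun acc x => PySem.List.insertBy b' x acc) ys).map g := by
  intro l
  induction l with
  | nil => intro ys; simp
  | cons x t ih =>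
    intro ys
    simp only [List.map_cons, List.foldl_cons]
    rw [insertBy_map g b b' hb x ys]
    exact ih _

theorem sorted_rev_map {α β : Type} (g : α → β) (key : β → Int) (l : List α) :
    PySem.List.sorted (l.map g) key true = (PySem.List.sorted l (fun a => key (g a)) true).map g := by
  rw [PySem.List.sorted_rev_eq_foldl_insertBy, PySem.List.sorted_rev_eq_foldl_insertBy]
  have := foldl_insertBy_map g (fun a b_ => decide (key b_ < key a))
    (fun x y => decide (key (g y) < key (g x))) (fun _ _ => rfl) l []
  simpa using this

theorem ofList_eq_self {l : List Char} (h : l.Nodup) : PySem.Set.ofList l = l := by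
  rw [← PySem.Set.update_nil_left]
  have := PySem.Set.update_eq_append_of_disjoint ([] : PySem.Set Char) l h (by simp)
  simpa using this

theorem nodup_sorted_order (st : String) :
    (PySem.List.sorted (PySem.Set.ofList st.toList) (fun c => (st.toList.count c : Int)) true).Nodup := by
  exact (PySem.List.sorted_perm _ _ _).nodup_iff.mpr (PySem.Set.nodup_ofList _)

-- A's char order equals sorted(set(st), key=count, reverse=True)
theorem freqListA_eq (st : String) :
    freqListA st = PySem.List.sorted (PySem.Set.ofList st.toList)
      (fun c => (st.toList.count c : Int)) true := by
  unfold freqListA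
  simp only []
  have hitems : (st.toList.foldl (fun d c => d.insert c ((PySem.Str.count st (String.ofList [c]) : Int))) PySem.Dict.empty).items
      = (PySem.Set.ofList st.toList).map (fun k => (k, (st.toList.count k : Int))) := by
    rw [items_foldl_insert_const (fun c => (PySem.Str.count st (String.ofList [c]) : Int)) st.toList]
    exact List.map_congr_left (fun k _ => by rw [count_single])
  rw [hitems]
  rw [sorted_rev_map (fun k => (k, (st.toList.count k : Int))) (fun p => p.2) (PySem.Set.ofList st.toList)]
  set ord := PySem.List.sorted (PySem.Set.ofList st.toList) (fun c => (st.toList.count c : Int)) true with hord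
  rw [PySem.Dict.ofList]
  have : PySem.Dict.empty.update (ord.map (fun k => (k, (st.toList.count k : Int)))) =
      (ord.map (fun k => (k, (st.toList.count k : Int)))).foldl (fun d p => d.insert p.1 p.2) PySem.Dict.empty := rfl
  rw [this]
  have hkeys := PySem.Dict.keys_foldl_insert_key (ν := Int)
    (ord.map (fun k => (k, (st.toList.count k : Int)))) Prod.fst (fun _ p => p.2) PySem.Dict.empty
  rw [hkeys]
  have hfst : (List.map Prod.fst (List.map (fun k => (k, (st.toList.count k : Int))) ord)) = ord := by
    rw [List.map_map]; exact List.map_id' ord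
  rw [hfst]
  have hke : (PySem.Dict.empty (κ := Char) (ν := Int)).keys = [] := rfl
  rw [hke, PySem.Set.update_nil_left]
  exact ofList_eq_self (by rw [hord]; exact nodup_sorted_order st)

-- B's ascending sort by the negated count is A's reverse sort by the count
theorem sorted_neg_key {α : Type} (l : List α) (key : α → Int) :
    PySem.List.sorted l (fun x => -(key x)) false = PySem.List.sorted l key true := by
  rw [PySem.List.sorted_eq_foldl_insertBy, PySem.List.sorted_rev_eq_foldl_insertBy]
  have hcmp : (fun (a b : α) => decide (-(key a) < -(key b))) = (fun a b => decide (key b < key a)) := by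
    funext a b
    simp [neg_lt_neg_iff]
  rw [hcmp]

-- B's char order equals the same sorted(set(st), key=count, reverse=True)
theorem order_alt_eq (st : String) :
    PySem.List.sorted (st.toList.foldl (fun d c => d.insert c (d.getD c 0 + 1)) (PySem.Dict.empty : PySem.Dict Char Int)).keys
      (fun c => -((st.toList.foldl (fun d c => d.insert c (d.getD c 0 + 1)) (PySem.Dict.empty : PySem.Dict Char Int)).getD c 0)) false
      = PySem.List.sorted (PySem.Set.ofList st.toList)
          (fun c => (st.toList.count c : Int)) true := by
  have hc : (st.toList.foldl (fun d c => d.insert c (d.getD c 0 + 1)) (PySem.Dict.empty : PySem.Dict Char Int))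
      = PySem.Dict.counter st.toList := by
    rw [← PySem.Dict.foldl_insert_getD_add_one_eq_counter]
  rw [hc, PySem.Dict.keys_counter]
  have hkey : (fun c => -((PySem.Dict.counter st.toList).getD c 0))
      = (fun c => -((st.toList.count c : Int))) := by
    funext c
    rw [PySem.Dict.getD_counter]
  rw [hkey]
  exact sorted_neg_key _ _

-- the middle codes: '1'*k + '0' with k counting up from the start index
def mids : List Char → Nat → List (Char × String)
  | [], _ => []
  | c :: t, k => (c, String.ofList (List.replicate k '1' ++ ['0'])) :: mids t (k + 1)

theorem mids_map_fst (l : List Char) : ∀ (k : Nat), (mids l k).map Prod.fst = l := by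
  induction l with
  | nil => intro k; simp [mids]
  | cons c t ih => intro k; simp [mids, ih]

-- A's middle loop over range(a, a+m) produces mids of the corresponding segment
theorem A_mid (cs : List Char) (hnd : cs.Nodup) :
    ∀ (m a : Nat) (d : PySem.Dict Char String), a + m ≤ cs.length →
    (∀ c ∈ (cs.drop a).take m, d.contains c = false) →
    ((PySem.List.pyRange a (a + m) 1).foldl
      (fun d i => d.insert (PySem.List.pyGetD cs i ' ')
        (String.ofList (List.replicate i.toNat '1' ++ ['0']))) d).items
      = d.items ++ mids ((cs.drop a).take m) a := by
  intro m
  induction m with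
  | zero =>
    intro a d _ _
    have h0 : PySem.List.pyRange a (a + ((0 : Nat) : Int)) 1 = [] := by
      simp [PySem.List.pyRange]
    rw [h0]
    simp [mids]
  | succ m ih =>
    intro a d hle hfresh
    have ha : a < cs.length := by omega
    have hcons : PySem.List.pyRange (a : Int) (a + (m + 1 : Nat)) 1
        = (a : Int) :: PySem.List.pyRange ((a : Int) + 1) (a + (m + 1 : Nat)) 1 := by
      exact PySem.List.pyRange_one_cons (by push_cast; omega)
    have hdrop : cs.drop a = cs[a] :: cs.drop (a + 1) := by
      exact (List.getElem_cons_drop ha).symm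
    have htake : (cs.drop a).take (m + 1) = cs[a] :: (cs.drop (a + 1)).take m := by
      rw [hdrop]; rfl
    have hget : PySem.List.pyGetD cs (a : Int) ' ' = cs[a] := by
      rw [PySem.List.pyGetD_eq_getElem cs ' ' (by positivity) (by exact_mod_cast ha)]
      simp
    rw [hcons]
    simp only [List.foldl_cons]
    have hcast : ((a : Int) + 1) = ((a + 1 : Nat) : Int) := by push_cast; ring
    have hcast2 : ((a : Int)).toNat = a := by simp
    rw [hget, hcast2]
    have hfreshA : d.contains cs[a] = false := by
      apply hfresh; rw [htake]; exact List.mem_cons_self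
    have hanotin : cs[a] ∉ cs.drop (a + 1) := by
      have hnd' : (cs.drop a).Nodup := hnd.drop
      rw [hdrop] at hnd'
      exact (List.nodup_cons.mp hnd').1
    have hfresh' : ∀ c ∈ (cs.drop (a+1)).take m,
        (d.insert cs[a] (String.ofList (List.replicate a '1' ++ ['0']))).contains c = false := by
      intro c hc
      rw [PySem.Dict.contains_insert]
      have h1 : (c == cs[a]) = false := by
        simp only [beq_eq_false_iff_ne, ne_eq]
        rintro rfl
        exact hanotin (List.mem_of_mem_take hc)
      rw [h1]
      have : c ∈ (cs.drop a).take (m+1) := by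
        rw [htake]; exact List.mem_cons_of_mem _ (by exact hc)
      rw [hfresh c this]; rfl
    rw [show ((a : Int) + ((m : Nat) + 1 : Nat)) = ((a+1 : Nat) : Int) + (m : Nat) by push_cast; ring] at *
    rw [hcast]
    rw [ih (a + 1) _ (by omega) hfresh']
    rw [PySem.Dict.items_insert_of_not_contains d _ hfreshA]
    rw [htake]
    simp [mids]

-- mids is the zip of the segment with the corresponding code words
theorem mids_eq_zip : ∀ (l : List Char) (j : Nat),
    mids l j = (l.zip ((List.range l.length).map
        (fun i => List.replicate (j + i) '1' ++ ['0']))).map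
      (fun p => (p.1, String.ofList p.2)) := by
  intro l
  induction l with
  | nil => intro j; simp [mids]
  | cons c t ih =>
    intro j
    simp only [mids, List.length_cons, List.range_succ_eq_map, List.map_cons, List.zip_cons_cons,
      List.map_map]
    rw [ih (j + 1)]
    have hL : List.map (fun i => List.replicate (j + 1 + i) '1' ++ ['0']) (List.range t.length)
        = List.map ((fun i => List.replicate (j + i) '1' ++ ['0']) ∘ Nat.succ) (List.range t.length) := by
      apply List.map_congr_left
      intro i _
      simp only [Function.comp_def, Nat.succ_eq_add_one]
      congr 2
      omega
    rw [hL]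
    simp

-- the recursive code book written out: k-1 middle-style words then the all-ones word
theorem codesAlt_eq : ∀ (m : Nat), codesAlt (m + 2)
    = (List.range (m + 1)).map (fun i => List.replicate i '1' ++ ['0'])
      ++ [List.replicate (m + 1) '1'] := by
  intro m
  induction m with
  | zero => rfl
  | succ m ih =>
    rw [show codesAlt (m + 1 + 2) = ['0'] :: (codesAlt (m + 2)).map (fun w => '1' :: w) from rfl, ih]
    rw [List.map_append, List.map_map, List.map_cons, List.map_nil,
      List.range_succ_eq_map (n := m + 1), List.map_cons, List.map_map]
    have h1 : List.map ((fun w => '1' :: w) ∘ fun i => List.replicate i '1' ++ ['0']) (List.range (m + 1))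
        = List.map ((fun i => List.replicate i '1' ++ ['0']) ∘ Nat.succ) (List.range (m + 1)) := by
      apply List.map_congr_left
      intro i _
      simp only [Function.comp_def, Nat.succ_eq_add_one]
      rw [List.replicate_succ]
      rfl
    rw [h1]
    simp [List.replicate_succ]

theorem codesAlt_length : ∀ (k : Nat), (codesAlt k).length = k := by
  intro k
  match k with
  | 0 => rfl
  | 1 => rfl
  | (m + 2) =>
    rw [codesAlt_eq m]
    simp

-- a dict built from distinct fresh keys keeps its pair list as items
theorem items_ofList_nodup (l : List (Char × List Char)) (h : (l.map Prod.fst).Nodup) :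
    (PySem.Dict.ofList l).items = l := by
  rw [PySem.Dict.ofList]
  have hupd : (PySem.Dict.empty (κ := Char) (ν := List Char)).update l
      = l.foldl (fun d p => d.insert p.1 p.2) PySem.Dict.empty := rfl
  rw [hupd]
  have := PySem.Dict.items_foldl_insert_fresh l Prod.fst Prod.snd PySem.Dict.empty
    (fun a _ => rfl) h
  simpa using this

-- the bodies of the two ports as functions of the already-computed char order
def Acore (cs : List Char) : List (String × String) :=
  let chLen := cs.length
  match PySem.List.pyGet? cs 0 with
  | none => []
  | some c0 =>
    let d0 : PySem.Dict Char String := (PySem.Dict.empty).insert c0 "0"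
    let d1 :=
      if chLen > 1 then
        let dm := (PySem.List.pyRange 1 ((chLen : Int) - 1) 1).foldl
          (fun d i => d.insert (PySem.List.pyGetD cs i ' ')
            (String.ofList (List.replicate i.toNat '1' ++ ['0']))) d0
        dm.insert (PySem.List.pyGetD cs ((chLen : Int) - 1) ' ')
          (String.ofList (List.replicate (chLen - 2) '1' ++ ['1']))
      else d0
    d1.items.map (fun p => (String.ofList [p.1], p.2))

def Bcore (order : List Char) : List (String × String) :=
  (PySem.Dict.ofList (order.zip (codesAlt order.length))).items.map
    (fun p => (String.ofList [p.1], String.ofList p.2))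

theorem core (c0 : Char) (rest : List Char) (hnd : (c0 :: rest).Nodup) :
    Acore (c0 :: rest) = Bcore (c0 :: rest) := by
  have hc0rest : c0 ∉ rest := (List.nodup_cons.mp hnd).1
  have hndrest : rest.Nodup := (List.nodup_cons.mp hnd).2
  have hd0 : ((PySem.Dict.empty : PySem.Dict Char String).insert c0 "0").items = [(c0, "0")] := by
    rw [PySem.Dict.items_insert_of_not_contains _ _ (by rfl)]
    rfl
  cases rest with
  | nil => rfl
  | cons r rs =>
    set rest := r :: rs with hrest
    have hrne : rest ≠ [] := by simp [hrest]
    have hlen : (c0 :: rest).length = rs.length + 2 := by simp [hrest]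
    have hdropLast_len : rest.dropLast.length = rs.length := by simp [hrest]
    -- the last element
    have hglast_mem : rest.getLast hrne ∈ rest := List.getLast_mem hrne
    have hglast_ne_c0 : rest.getLast hrne ≠ c0 := fun h => hc0rest (h ▸ hglast_mem)
    have hglast_not_dl : rest.getLast hrne ∉ rest.dropLast := by
      have hsplit := List.dropLast_append_getLast hrne
      have : (rest.dropLast ++ [rest.getLast hrne]).Nodup := by rw [hsplit]; exact hndrest
      have hdisj := (List.nodup_append.mp this).2.2
      intro hmem
      exact hdisj _ hmem _ (List.mem_singleton_self _) rfl
    -- ===== A's side: items = first :: middles ++ last =====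
    have hfresh : ∀ c ∈ rest.dropLast,
        ((PySem.Dict.empty : PySem.Dict Char String).insert c0 "0").contains c = false := by
      intro c hc
      rw [PySem.Dict.contains_insert]
      have : (c == c0) = false := by
        simp only [beq_eq_false_iff_ne, ne_eq]
        rintro rfl
        exact hc0rest (List.mem_of_mem_dropLast hc)
      rw [this]; rfl
    have hdrop1 : (c0 :: rest).drop 1 = rest := rfl
    have htake : ((c0 :: rest).drop 1).take rs.length = rest.dropLast := by
      rw [hdrop1, List.dropLast_eq_take]
      congr 1
    have hAmid := A_mid (c0 :: rest) hnd rs.length 1 ((PySem.Dict.empty : PySem.Dict Char String).insert c0 "0")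
      (by simp [hrest]; omega) (by rw [htake]; exact hfresh)
    rw [htake, hd0] at hAmid
    have hba : ((1 : Nat) : Int) = (1 : Int) := by norm_num
    rw [hba] at hAmid
    have hkey1 : PySem.List.pyGetD (c0 :: rest) (1 + (rs.length : Int)) ' ' = rest.getLast hrne := by
      rw [PySem.List.pyGetD_eq_getElem (c0 :: rest) ' ' (by positivity)
        (by simp [hrest]; omega)]
      have ht : ((1 : Int) + (rs.length : Int)).toNat = rs.length + 1 := by omega
      simp only [ht]
      rw [List.getElem_cons_succ]
      rw [List.getLast_eq_getElem hrne]
      congr 1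
    have hcontains_mid : ∀ (dm : PySem.Dict Char String),
        dm.items = [(c0, "0")] ++ mids rest.dropLast 1 → dm.contains (rest.getLast hrne) = false := by
      intro dm hitems
      by_contra hcon
      have : dm.contains (rest.getLast hrne) = true := by
        cases h : dm.contains (rest.getLast hrne)
        · exact absurd h hcon
        · rfl
      have hmem := (PySem.Dict.contains_iff_mem_keys dm _).mp this
      have hkeys : dm.keys = c0 :: rest.dropLast := by
        simp only [PySem.Dict.keys, hitems]
        simp [mids_map_fst]
      rw [hkeys] at hmem
      rcases List.mem_cons.mp hmem with h | h
      · exact hglast_ne_c0 h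
      · exact hglast_not_dl h
    have hAeq : Acore (c0 :: rest)
        = ((c0, "0") :: (mids rest.dropLast 1
            ++ [(rest.getLast hrne, String.ofList (List.replicate (rs.length + 2 - 2) '1' ++ ['1']))])).map
          (fun p => (String.ofList [p.1], p.2)) := by
      simp only [Acore, PySem.List.pyGet?_zero_cons, hlen]
      have hifA : (rs.length + 2 > 1) = True := by simp
      simp only [hifA, if_true]
      have hb : ((rs.length + 2 : Nat) : Int) - 1 = (1 : Int) + (rs.length : Int) := by push_cast; ring
      rw [hb, hkey1]
      rw [PySem.Dict.items_insert_of_not_contains _ _ (hcontains_mid _ hAmid), hAmid]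
      rfl
    -- ===== B's side: items = the zip, decomposed the same way =====
    have hlenz : (c0 :: rest).length ≤ (codesAlt (c0 :: rest).length).length := by
      rw [codesAlt_length]
    have hBitems : (PySem.Dict.ofList ((c0 :: rest).zip (codesAlt (c0 :: rest).length))).items
        = (c0 :: rest).zip (codesAlt (c0 :: rest).length) := by
      apply items_ofList_nodup
      rw [List.map_fst_zip hlenz]
      exact hnd
    have hzip : (c0 :: rest).zip (codesAlt (c0 :: rest).length)
        = (c0, ['0']) :: (rest.dropLast.zip ((List.range rest.dropLast.length).map
              (fun i => List.replicate (1 + i) '1' ++ ['0']))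
            ++ [(rest.getLast hrne, List.replicate (rs.length + 1) '1')]) := by
      rw [hlen, codesAlt_eq rs.length, List.range_succ_eq_map (n := rs.length)]
      simp only [List.map_cons, List.map_map]
      simp only [List.replicate_zero, List.nil_append]
      rw [List.cons_append, List.zip_cons_cons]
      conv_lhs => rw [show rest = rest.dropLast ++ [rest.getLast hrne] from (List.dropLast_append_getLast hrne).symm]
      rw [List.zip_append (by simp [hdropLast_len])]
      have hmapeq : List.map ((fun i => List.replicate i '1' ++ ['0']) ∘ Nat.succ) (List.range rs.length)
          = List.map (fun i => List.replicate (1 + i) '1' ++ ['0']) (List.range rest.dropLast.length) := by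
        rw [hdropLast_len]
        apply List.map_congr_left
        intro i _
        simp only [Function.comp_def, Nat.succ_eq_add_one]
        congr 2
        omega
      rw [hmapeq]
      simp
    have hBeq : Bcore (c0 :: rest)
        = ((c0, ['0']) :: (rest.dropLast.zip ((List.range rest.dropLast.length).map
              (fun i => List.replicate (1 + i) '1' ++ ['0']))
            ++ [(rest.getLast hrne, List.replicate (rs.length + 1) '1')])).map
          (fun p => (String.ofList [p.1], String.ofList p.2)) := by
      simp only [Bcore]
      rw [hBitems, hzip]
    -- ===== both sides are the same list =====
    rw [hAeq, hBeq]
    simp only [List.map_cons, List.map_append, List.map_nil]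
    rw [mids_eq_zip rest.dropLast 1, List.map_map]
    have hrep : String.ofList (List.replicate (rs.length + 2 - 2) '1' ++ ['1'])
        = String.ofList (List.replicate (rs.length + 1) '1') := by
      rw [show rs.length + 2 - 2 = rs.length from by omega, ← List.replicate_succ']
    rw [hrep]
    rfl

-- ===== VERDICT (by name: the statements are the Claim_ definitions above) =====
theorem huffman_dict_spec : Claim_equal_huffman_dict := by
  intro st _ hpre
  unfold Spec_huffman_dict
  have hA : huffman_dict st = Acore (freqListA st) := rfl
  have hB : huffman_dict_alt st = Bcore
      (PySem.List.sorted (st.toList.foldl (fun d c => d.insert c (d.getD c 0 + 1)) (PySem.Dict.empty : PySem.Dict Char Int)).keys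
        (fun c => -((st.toList.foldl (fun d c => d.insert c (d.getD c 0 + 1)) (PySem.Dict.empty : PySem.Dict Char Int)).getD c 0)) false) := rfl
  rw [hA, hB, freqListA_eq st, order_alt_eq st]
  have hxs : st.toList ≠ [] := by
    intro h
    apply hpre
    have : st.toList = "".toList := by simpa using h
    exact String.toList_injective this
  have hne : PySem.List.sorted (PySem.Set.ofList st.toList)
      (fun c => (st.toList.count c : Int)) true ≠ [] := by
    rw [Ne, PySem.List.sorted_eq_nil_iff]
    intro h
    cases hx : st.toList with
    | nil => exact hxs hx
    | cons c t =>
      have : c ∈ PySem.Set.ofList st.toList := (PySem.Set.mem_ofList _ _).mpr (by rw [hx]; exact List.mem_cons_self)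
      rw [h] at this
      exact absurd this (List.not_mem_nil)
  obtain ⟨c0, rest, hco⟩ := List.exists_cons_of_ne_nil hne
  rw [hco]
  exact core c0 rest (hco ▸ nodup_sorted_order st)
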